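/- GENERATED by mk_final_copies.py from the proof of the farm's unit `codebook_decode_deinterleave_repeat.2c` (farm:codebook_decode_deinterleave_repeat.2c.1: Proof.lean) as the
   re-elaboration sweep compiled it — do not edit. -/
import Asan.CheckWalk
import Vorbis.Spec.ReaderLemmas
import Vorbis.Spec.Units.codebook_decode_deinterleave_repeat_2c

namespace Vorbis.Spec.codebook_decode_deinterleave_repeat_2c
open X86 X86.User Asan Vorbis Vorbis.Spec Vorbis.Spec.Deint

/-- **The epilogue's assertion after `error(f, VORBIS_invalid_stream)` has returned to 10DC9EH** (both paths of the handler that reach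
the call 10DC99H arrive with the same memory: the handler's entry memory with the return address of the last check call at
`[rsp−8]`). `s` = the state at the call, `sr` = the state after the return. The callee's footprint (48 bytes of stack below the
return address, `f->error`) lies inside `Seg2Wins`; `Bits f` is kept over it (`Paging.reader_of_footprint`: `error` is inside
`[f+136, f+144)`); `Common.carry_seg2` gives `Common` at `sr`, and `AtEpilogue` with eax = 0 is read off it. -/
theorem epilogue_after_error {others : List Obj} {frames : List (Nat × FrameLayout)} {Blk : Block → Prop} {len : Nat} {u₀ : State}
    {ret : Word} {e u s sr : State} (hcom : Common others frames Blk len u₀ ret e u) (g : DeintGeo e)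
    (hmem : s.mem = u.mem.writeLE (e.reg .rsp - 112) 8 1105054)
    (hrsp_s : s.reg .rsp = e.reg .rsp - 112) (hrdi : s.reg .rdi = e.reg .rdi)
    (hrip : sr.rip = 1105054) (hrsp : sr.reg .rsp = e.reg .rsp - 104) (hr12 : sr.reg .r12 = u.reg .r12)
    (hsame : Mem.SameExcept ((error.spec others frames).footprint s) s.mem sr.mem)
    (hinv : abiInv sr) (hpost : (error.spec others frames).post s sr) :
    AtEpilogue others frames Blk len u₀ ret e sr := by
  have he_room := g.sp_lo
  have he_top := g.sp_hi
  have gf1 := g.f_st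
  have gf2 := g.f_lo
  have gf3 := g.f_hi
  simp only [fOf] at gf1 gf2 gf3
  obtain ⟨hrax, _, _⟩ := hpost
  simp only [X86.User.Spec.footprint, vspec, hrsp_s, hrdi] at hsame
  -- the footprint since the handler's entry: the push, then the callee's two windows
  have hpush : Mem.SameExcept (Seg2Wins (e.reg .rsp).toNat (fOf e)) u.mem s.mem := by
    rw [hmem]
    unfold Seg2Wins
    exact Mem.SameExcept.writeLE _ _ _ _ _ (by u_omega) ⟨_, List.mem_cons_self, by u_omega, by u_omega⟩
  have hs : Mem.SameExcept (Seg2Wins (e.reg .rsp).toNat (fOf e)) u.mem sr.mem := by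
    refine Vorbis.Spec.Reader.sameExcept_through_callee hpush hsame ?_
    unfold Seg2Wins
    simp only [fOf, List.forall_mem_cons, List.not_mem_nil, false_imp_iff, implies_true, and_true, X86.User.inSpans_cons,
      X86.User.inSpans_nil, or_false]
    repeat' apply And.intro
    all_goals u_omega
  -- the spill slot of `f`: off the push and off the callee's windows
  have hfs : UInt64.ofNat (sr.mem.readLE (e.reg .rsp - 80) 8) = e.reg .rdi := by
    have r1 : sr.mem.readLE (e.reg .rsp - 80) 8 = s.mem.readLE (e.reg .rsp - 80) 8 := by
      apply hsame.readLE
      · u_omega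
      · simp only [List.forall_mem_cons, List.not_mem_nil, false_imp_iff, implies_true, and_true]
        repeat' apply And.intro
        all_goals u_omega
    have r2 : s.mem.readLE (e.reg .rsp - 80) 8 = u.mem.readLE (e.reg .rsp - 80) 8 := by
      rw [hmem]
      exact Mem.readLE_writeLE_disjoint_noWrap _ _ _ _ _ _ (by u_omega) (by u_omega) (by u_omega)
    rw [r1, r2]
    exact hcom.fSlot
  -- `Bits f`, μ: over the push, then over `error`'s store into `f->error`
  have hb : Bits Blk len u.mem (e.reg .rdi).toNat := hcom.reader.bits
  have hk := Vorbis.Spec.Reader.store_off_obj hb (e.reg .rsp - 112) 8 1105054 (by u_omega) (by u_omega)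
  rw [← hmem] at hk
  have hcal := (Vorbis.Spec.Paging.reader_of_footprint hk.1.bits hsame (by
    simp only [List.forall_mem_cons, List.not_mem_nil, false_imp_iff, implies_true, and_true]
    repeat' apply And.intro
    all_goals u_omega)).1
  have hrd : ReaderPost Blk len e.mem sr.mem (fOf e) := (hcom.reader.trans hk.1).trans hcal
  have hC : Common others frames Blk len u₀ ret e sr :=
    Common.carry_seg2 hcom g hs hrsp (hr12.trans hcom.c) hfs hrd hinv
  refine ⟨hrip, hC.mid, hC.reader, Or.inl hrax, ?_, ?_⟩
  · intro h1
    rw [hrax] at h1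
    exact absurd h1 (by decide)
  · intro _
    exact ⟨hC.cInt, hC.pInt⟩

end Vorbis.Spec.codebook_decode_deinterleave_repeat_2c

open X86 X86.User Asan Vorbis Vorbis.Spec Vorbis.Spec.Deint

set_option maxRecDepth 4000
set_option maxHeartbeats 4000000

/-- **Segment .2c of `codebook_decode_deinterleave_repeat`: the `z < 0` handler 10DC5CH … 10DC99H** (C lines 1908 – 1910): from
`At2c` (`Common` at 10DC5CH) to `AtFalse1` (cut11: no byte left in the segment and it is the last one) or, after
`error(f, VORBIS_invalid_stream)`, to the epilogue with eax = 0. Two check sites (load1 `f->bytes_in_seg`, load4 `f->last_seg`: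
fields of the live object `*f`), one call. Every exit is `Common.carry_seg2` over the pushes of the return addresses (and the
callee's footprint: `epilogue_after_error`). -/
theorem Vorbis.Spec.Worked.codebook_decode_deinterleave_repeat_2c_ok : Vorbis.Spec.codebook_decode_deinterleave_repeat_2c.Statement := by
  intro Lay hLay μ hμ u₀ hcode h_load1 h_load4 h_error others frames Blk len ret e u hat
  obtain ⟨hrip, hcom⟩ := hat
  have hcom' := hcom
  obtain ⟨hmid, hpre, hreader, hcb, hapart, hbook, htype2, hc, chSlot, outsSlot, fSlot, cpSlot, ppSlot, lenSlot, htable, hcInt,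
    hpInt⟩ := hcom'
  obtain ⟨he, hrsp, hra, h15, h14, h13, h12, hbp, hbx, hsame, hcodeok, habi, hun⟩ := hmid
  v_entry he
  have g : DeintGeo e := DeintGeo.of_pre hpre he_room
  have hdf := habi.1
  have hmx := habi.2
  have hsse := Vorbis.sseOK_of_abiInv habi
  have w_eq : Mem.EqOn Vorbis.L.textLo Vorbis.L.textHi u₀.mem u.mem := hcodeok
  have herr := h_error others frames
  have gf1 := g.f_st
  have gf2 := g.f_lo
  have gf3 := g.f_hi
  simp only [fOf] at gf1 gf2 gf3
  u_walk hcode [hμ.vendor] until [Vorbis.L.codebook_decode_deinterleave_repeat.cut11,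
    Vorbis.L.codebook_decode_deinterleave_repeat.cut3] span [Vorbis.L.textLo, Vorbis.L.textHi] side (v_side)
  · -- 10DC68H: load1 f->bytes_in_seg
    have hun1 : ShadowUntouched u.mem s_10dc68.mem := by v_untouched
    have hun2 : ShadowUntouched e.mem s_10dc68.mem := hun.trans hun1
    refine hpre.book.reader.env.obj.accSmall hpre.args hun2 _ 1 (by decide) (by u_omega) ?_
    simp only [Vorbis.Off.sizeof.stb_vorbis]
    u_omega
  · -- 10DC99H (`bytes_in_seg ≠ 0`): the call of `error`, the ABI invariant
    v_inv
  · -- … and its precondition: the shadow clause, `*f` inside one live object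
    have hun1 : ShadowUntouched u.mem s_10dc99.mem := by v_untouched
    have hun2 : ShadowUntouched e.mem s_10dc99.mem := hun.trans hun1
    show ShadowPre others frames s_10dc99 ∧ LiveIn others frames (s_10dc99.reg .rdi).toNat Off.sizeof.stb_vorbis
    refine ⟨hpre.book.reader.shadow.callee hun2 (by u_omega) (by u_omega) (by u_omega), ?_⟩
    rw [w_rdi]
    exact hpre.book.reader.env.obj
  · -- 10DC7DH: load4 f->last_seg
    have hun1 : ShadowUntouched u.mem s_10dc7d.mem := by v_untouched
    have hun2 : ShadowUntouched e.mem s_10dc7d.mem := hun.trans hun1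
    refine hpre.book.reader.env.obj.accSmall hpre.args hun2 _ 4 (by decide) (by u_omega) ?_
    simp only [Vorbis.Off.sizeof.stb_vorbis]
    u_omega
  · -- 10DC99H (`bytes_in_seg = 0`, `last_seg = 0`): the call of `error` again
    v_inv
  · have hun1 : ShadowUntouched u.mem s_10dc99.mem := by v_untouched
    have hun2 : ShadowUntouched e.mem s_10dc99.mem := hun.trans hun1
    show ShadowPre others frames s_10dc99 ∧ LiveIn others frames (s_10dc99.reg .rdi).toNat Off.sizeof.stb_vorbis
    refine ⟨hpre.book.reader.shadow.callee hun2 (by u_omega) (by u_omega) (by u_omega), ?_⟩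
    rw [w_rdi]
    exact hpre.book.reader.env.obj
  · -- 10DC9EH (cut3) after `error`, first path
    exact ReachVia.done (Or.inr (Vorbis.Spec.codebook_decode_deinterleave_repeat_2c.epilogue_after_error hcom g w_mem_10dc99
      w_rsp_10dc99 w_rdi_10dc99 w_rip w_rsp (w_kept .r12 rfl) w_same w_inv w_post))
  · -- 10DF5FH (cut11): `return FALSE`; only the return address of a check call was stored
    have hs : Mem.SameExcept (Seg2Wins (e.reg .rsp).toNat (fOf e)) u.mem s_10dc89.mem := by
      rw [w_mem]
      unfold Seg2Wins
      exact Mem.SameExcept.writeLE _ _ _ _ _ (by u_omega) ⟨_, List.mem_cons_self, by u_omega, by u_omega⟩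
    have hab : abiInv s_10dc89 := by
      refine Vorbis.abiInv_of ?_ ?_
      · rw [w_flags]
        simp only [X86.User.df_setStatus]
        exact w_df_10dc7d
      · rw [w_mxcsr]
        exact hmx
    have hb : Bits Blk len u.mem (e.reg .rdi).toNat := hreader.bits
    have hk := Vorbis.Spec.Reader.store_off_obj hb (e.reg .rsp - 112) 8 1105026 (by u_omega) (by u_omega)
    rw [← w_mem] at hk
    refine ReachVia.done (Or.inl ⟨w_rip, ?_⟩)
    refine Common.carry_seg2 hcom g hs w_rsp ((w_kept .r12 rfl).trans hc) ?_ (hreader.trans hk.1) hab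
    u_resolve
  · -- 10DC9EH (cut3) after `error`, second path
    exact ReachVia.done (Or.inr (Vorbis.Spec.codebook_decode_deinterleave_repeat_2c.epilogue_after_error hcom g w_mem_10dc99
      w_rsp_10dc99 w_rdi_10dc99 w_rip w_rsp (w_kept .r12 rfl) w_same w_inv w_post))
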